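-- pv_equiv track=rewrite | github.com/danielphillippe27-netizen/flyrpro | s3_to_supabase_one_by_one.py | next_pending_source
-- ===== SOURCE A (Python) =====
-- from typing import Dict, List, Set
--
-- def next_pending_source(files: List[Dict], done: Set[str]) -> str | None:
--     pending = [f for f in files if f.get("key") not in done]
--     # Prefer addresses first, then buildings, then lexicographic fallback.
--     pending.sort(
--         key=lambda f: (
--             0 if "address" in f.get("source_id", "").lower() else 1,
--             f.get("source_id", ""),
--         )
--     )
--     if not pending:
--         return None
--     return pending[0].get("source_id")
-- ===== SOURCE B (Python) =====
-- def next_pending_source(files, done):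
--     # One pass: keep the lexicographically-least pending file per priority class
--     # ("address" files beat the rest), instead of sorting everything.
--     addr_best = None
--     other_best = None
--     for f in files:
--         if f.get("key") in done:
--             continue
--         if "address" in f.get("source_id", "").lower():
--             if addr_best is None or f.get("source_id", "") < addr_best.get("source_id", ""):
--                 addr_best = f
--         else:
--             if other_best is None or f.get("source_id", "") < other_best.get("source_id", ""):
--                 other_best = f
--     best = addr_best if addr_best is not None else other_best
--     return None if best is None else best.get("source_id")
-- ===== Notes on version B (the rewrite author's own statement) =====
-- stated objective: alternative
-- what changed: Replaces A's filter-then-sort by composite key (address flag, source_id) with a single pass that keeps the lexicographically least pending file in each of the two priority buckets (address / non-address) and picks the address bucket first.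
import Mathlib
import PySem

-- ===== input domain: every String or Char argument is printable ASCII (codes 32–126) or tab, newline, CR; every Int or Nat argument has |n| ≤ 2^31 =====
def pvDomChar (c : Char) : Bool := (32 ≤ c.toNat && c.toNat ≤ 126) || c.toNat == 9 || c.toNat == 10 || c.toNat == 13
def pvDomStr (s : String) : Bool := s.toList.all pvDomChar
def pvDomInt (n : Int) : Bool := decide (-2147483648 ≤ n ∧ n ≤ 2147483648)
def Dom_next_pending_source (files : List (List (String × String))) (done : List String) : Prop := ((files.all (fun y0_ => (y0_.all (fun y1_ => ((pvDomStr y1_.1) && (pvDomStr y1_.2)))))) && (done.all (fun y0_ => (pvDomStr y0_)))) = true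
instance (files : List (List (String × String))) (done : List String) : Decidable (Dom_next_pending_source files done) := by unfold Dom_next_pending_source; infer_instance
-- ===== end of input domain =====

-- B replaces A's composite-key sort of the pending list by a single pass that keeps the
-- lexicographically least pending file per priority class ("address" beats the rest).

-- ===== PORT A =====
-- f.get(k)  (assoc list, first match = Python dict lookup)
def pvGet? (f : List (String × String)) (k : String) : Option String :=
  (PySem.Dict.mk f).get? k

-- f.get(k, "")
def pvGetD (f : List (String × String)) (k : String) : String :=
  (pvGet? f k).getD ""

-- the sort key: (0 if "address" in f.get("source_id","").lower() else 1, f.get("source_id",""))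
def pvFlag (f : List (String × String)) : Int :=
  if PySem.Str.isIn "address" (PySem.Str.lower (pvGetD f "source_id")) then 0 else 1

-- f.get("key") not in done  (None is never in a set of strings)
def pvPending (done : List String) (f : List (String × String)) : Bool :=
  match pvGet? f "key" with
  | some k => !(done.contains k)
  | none => true

def next_pending_source (files : List (List (String × String))) (done : List String) : Option String :=
  let pending := files.filter (pvPending done)
  match PySem.List.sorted2 pending pvFlag (fun f => pvGetD f "source_id") with
  | [] => none
  | f :: _ => pvGet? f "source_id"

-- ===== PORT B =====
-- B's loop state: (addr_best, other_best)
def pvBStep (done : List String) :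
    Option (List (String × String)) × Option (List (String × String)) →
    List (String × String) →
    Option (List (String × String)) × Option (List (String × String))
  | (a, o), f =>
    if (match pvGet? f "key" with | some k => done.contains k | none => false) then (a, o)
    else if PySem.Str.isIn "address" (PySem.Str.lower (pvGetD f "source_id")) then
      match a with
      | none => (some f, o)
      | some g => if pvGetD f "source_id" < pvGetD g "source_id" then (some f, o) else (a, o)
    else
      match o with
      | none => (a, some f)
      | some g => if pvGetD f "source_id" < pvGetD g "source_id" then (a, some f) else (a, o)

def next_pending_source_alt (files : List (List (String × String))) (done : List String) : Option String :=
  let st := files.foldl (pvBStep done) (none, none)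
  match (match st.1 with | some g => some g | none => st.2) with
  | none => none
  | some f => pvGet? f "source_id"

-- ===== PRECONDITION & SPEC =====
def Spec_next_pending_source (files : List (List (String × String))) (done : List String) (out : Option String) : Prop := out = next_pending_source_alt files done
instance (files : List (List (String × String))) (done : List String) (out : Option String) : Decidable (Spec_next_pending_source files done out) := by unfold Spec_next_pending_source; infer_instance

-- ===== CLAIM (what is proved, stated in full; the proofs are below) =====
def Claim_equal_next_pending_source : Prop := ∀ (files : List (List (String × String))) (done : List String), Dom_next_pending_source files done → Spec_next_pending_source files done (next_pending_source files done)

-- ===== LEMMAS AND PROOFS =====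

-- the comparison 'key(x) < key(m)' on A's composite key (flag, source_id)
def pvLt (a b : List (String × String)) : Bool :=
  decide (pvFlag a < pvFlag b) || (!decide (pvFlag b < pvFlag a) && decide (pvGetD a "source_id" < pvGetD b "source_id"))

-- one step of 'running first-minimum under pvLt'
def pvMinStep (m : Option (List (String × String))) (x : List (String × String)) :
    Option (List (String × String)) :=
  match m with
  | none => some x
  | some h => if pvLt x h then some x else some h

-- 'addr_best if addr_best is not None else other_best'
def pvPick (st : Option (List (String × String)) × Option (List (String × String))) :
    Option (List (String × String)) :=
  match st.1 with
  | some g => some g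
  | none => st.2

lemma pvGuard_of_pending {done : List String} {f : List (String × String)}
    (h : pvPending done f = true) :
    (match pvGet? f "key" with | some k => done.contains k | none => false) = false := by
  unfold pvPending at h
  cases hk : pvGet? f "key" with
  | none => simp
  | some k => rw [hk] at h; simp at h; simp [h]

lemma pvGuard_of_not_pending {done : List String} {f : List (String × String)}
    (h : pvPending done f = false) :
    (match pvGet? f "key" with | some k => done.contains k | none => false) = true := by
  unfold pvPending at h
  cases hk : pvGet? f "key" with
  | none => rw [hk] at h; simp at h
  | some k => rw [hk] at h; simp at h; simp [h]

-- head of an insertion is decided by the very first comparison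
lemma head_insertBy {α : Type} (before : α → α → Bool) (x : α) (acc : List α) :
    (PySem.List.insertBy before x acc).head? =
      some (match acc with | [] => x | y :: _ => if before x y then x else y) := by
  cases acc with
  | nil => simp [PySem.List.insertBy]
  | cons y ys => by_cases h : before x y = true <;> simp [PySem.List.insertBy, h]

-- head of the insertion-sort fold is the running first-minimum
lemma head_foldl_insertBy (xs : List (List (String × String))) (acc : List (List (String × String))) :
    (xs.foldl (fun acc x => PySem.List.insertBy pvLt x acc) acc).head? =
      xs.foldl pvMinStep acc.head? := by
  induction xs generalizing acc with
  | nil => rfl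
  | cons x xs ih =>
      simp only [List.foldl_cons, ih, head_insertBy]
      cases acc with
      | nil => rfl
      | cons y ys =>
          simp only [List.head?_cons, pvMinStep]
          by_cases h : pvLt x y = true <;> simp [h]

-- head of A's sorted2 call
lemma sorted2_head (xs : List (List (String × String))) :
    (PySem.List.sorted2 xs pvFlag (fun f => pvGetD f "source_id") false).head? =
      xs.foldl pvMinStep none := by
  have h : PySem.List.sorted2 xs pvFlag (fun f => pvGetD f "source_id") false =
      xs.foldl (fun acc x => PySem.List.insertBy pvLt x acc) [] := rfl
  rw [h, head_foldl_insertBy]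
  rfl

-- B's fold skips exactly the non-pending files
lemma foldl_bstep_filter (done : List String) (xs : List (List (String × String)))
    (st : Option (List (String × String)) × Option (List (String × String))) :
    xs.foldl (pvBStep done) st = (xs.filter (pvPending done)).foldl (pvBStep done) st := by
  induction xs generalizing st with
  | nil => rfl
  | cons x xs ih =>
      by_cases hp : pvPending done x = true
      · simp [hp, ih]
      · have hp' : pvPending done x = false := by simpa using hp
        have hskip : pvBStep done st x = st := by
          rcases st with ⟨a, o⟩
          simp only [pvBStep]
          rw [pvGuard_of_not_pending hp']
          simp
        simp [hp', hskip, ih]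

-- flag values
lemma pvFlag_of_addr {f : List (String × String)}
    (h : PySem.Str.isIn "address" (PySem.Str.lower (pvGetD f "source_id")) = true) :
    pvFlag f = 0 := by simp only [pvFlag, h, if_true]

lemma pvFlag_of_not_addr {f : List (String × String)}
    (h : PySem.Str.isIn "address" (PySem.Str.lower (pvGetD f "source_id")) = false) :
    pvFlag f = 1 := by simp only [pvFlag, h, Bool.false_eq_true, if_false]

-- pvLt evaluated on known flags
lemma pvLt_01 {a b : List (String × String)} (h1 : pvFlag a = 0) (h2 : pvFlag b = 1) :
    pvLt a b = true := by
  unfold pvLt; rw [h1, h2]; rfl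

lemma pvLt_10 {a b : List (String × String)} (h1 : pvFlag a = 1) (h2 : pvFlag b = 0) :
    pvLt a b = false := by
  unfold pvLt; rw [h1, h2]; rfl

lemma pvLt_00 {a b : List (String × String)} (h1 : pvFlag a = 0) (h2 : pvFlag b = 0) :
    pvLt a b = decide (pvGetD a "source_id" < pvGetD b "source_id") := by
  unfold pvLt; rw [h1, h2]; rfl

lemma pvLt_11 {a b : List (String × String)} (h1 : pvFlag a = 1) (h2 : pvFlag b = 1) :
    pvLt a b = decide (pvGetD a "source_id" < pvGetD b "source_id") := by
  unfold pvLt; rw [h1, h2]; rfl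

-- main invariant: over a pending list, B's two-bucket fold picks the running first-minimum
lemma pvMain (done : List String) (xs : List (List (String × String))) :
    ∀ (a o : Option (List (String × String))),
      (∀ g, a = some g → pvFlag g = 0) → (∀ g, o = some g → pvFlag g = 1) →
      (∀ f ∈ xs, pvPending done f = true) →
      pvPick (xs.foldl (pvBStep done) (a, o)) = xs.foldl pvMinStep (pvPick (a, o)) := by
  induction xs with
  | nil => intro a o _ _ _; rfl
  | cons x xs ih =>
      intro a o ha ho hpend
      have hx : pvPending done x = true := hpend x (by simp)
      have hxs : ∀ f ∈ xs, pvPending done f = true := fun f hf => hpend f (List.mem_cons_of_mem _ hf)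
      have hg0 := pvGuard_of_pending hx
      rw [List.foldl_cons, List.foldl_cons]
      by_cases hfl : PySem.Str.isIn "address" (PySem.Str.lower (pvGetD x "source_id")) = true
      · -- x is an address file: flag 0
        have hx0 : pvFlag x = 0 := pvFlag_of_addr hfl
        cases a with
        | none =>
            have hb : pvBStep done (none, o) x = (some x, o) := by
              simp only [pvBStep]
              rw [hg0, hfl]
              simp only [Bool.false_eq_true, if_false, if_true]
            rw [hb]
            refine (ih (some x) o (fun g hg => by cases hg; exact hx0) ho hxs).trans (congrArg (fun m => List.foldl pvMinStep m xs) ?_)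
            cases o with
            | none => rfl
            | some g =>
                have hlt := pvLt_01 hx0 (ho g rfl)
                simp only [pvPick, pvMinStep, hlt, if_true]
        | some w =>
            have hw0 : pvFlag w = 0 := ha w rfl
            have hlt := pvLt_00 hx0 hw0
            by_cases hsid : pvGetD x "source_id" < pvGetD w "source_id"
            · have hb : pvBStep done (some w, o) x = (some x, o) := by
                simp only [pvBStep]
                rw [hg0, hfl]
                simp only [Bool.false_eq_true, if_false, if_true]
                rw [if_pos hsid]
              rw [hb]
              refine (ih (some x) o (fun g hg => by cases hg; exact hx0) ho hxs).trans (congrArg (fun m => List.foldl pvMinStep m xs) ?_)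
              simp only [pvPick, pvMinStep, hlt, decide_eq_true_eq, if_pos hsid]
            · have hb : pvBStep done (some w, o) x = (some w, o) := by
                simp only [pvBStep]
                rw [hg0, hfl]
                simp only [Bool.false_eq_true, if_false, if_true]
                rw [if_neg hsid]
              rw [hb]
              refine (ih (some w) o ha ho hxs).trans (congrArg (fun m => List.foldl pvMinStep m xs) ?_)
              simp only [pvPick, pvMinStep, hlt, decide_eq_true_eq, if_neg hsid]
      · -- x is not an address file: flag 1
        have hfl' : PySem.Str.isIn "address" (PySem.Str.lower (pvGetD x "source_id")) = false := by
          simpa using hfl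
        have hx1 : pvFlag x = 1 := pvFlag_of_not_addr hfl'
        cases o with
        | none =>
            have hb : pvBStep done (a, none) x = (a, some x) := by
              simp only [pvBStep]
              rw [hg0, hfl']
              simp only [Bool.false_eq_true, if_false]
            rw [hb]
            refine (ih a (some x) ha (fun g hg => by cases hg; exact hx1) hxs).trans (congrArg (fun m => List.foldl pvMinStep m xs) ?_)
            cases a with
            | none => rfl
            | some w =>
                have hlt := pvLt_10 hx1 (ha w rfl)
                simp only [pvPick, pvMinStep, hlt, Bool.false_eq_true, if_false]
        | some g =>
            have hg1 : pvFlag g = 1 := ho g rfl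
            have hlt := pvLt_11 hx1 hg1
            by_cases hsid : pvGetD x "source_id" < pvGetD g "source_id"
            · have hb : pvBStep done (a, some g) x = (a, some x) := by
                simp only [pvBStep]
                rw [hg0, hfl']
                simp only [Bool.false_eq_true, if_false]
                rw [if_pos hsid]
              rw [hb]
              refine (ih a (some x) ha (fun g' hg' => by cases hg'; exact hx1) hxs).trans (congrArg (fun m => List.foldl pvMinStep m xs) ?_)
              cases a with
              | none => simp only [pvPick, pvMinStep, hlt, decide_eq_true_eq, if_pos hsid]
              | some w =>
                  have hltw := pvLt_10 hx1 (ha w rfl)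
                  simp only [pvPick, pvMinStep, hltw, Bool.false_eq_true, if_false]
            · have hb : pvBStep done (a, some g) x = (a, some g) := by
                simp only [pvBStep]
                rw [hg0, hfl']
                simp only [Bool.false_eq_true, if_false]
                rw [if_neg hsid]
              rw [hb]
              refine (ih a (some g) ha ho hxs).trans (congrArg (fun m => List.foldl pvMinStep m xs) ?_)
              cases a with
              | none => simp only [pvPick, pvMinStep, hlt, decide_eq_true_eq, if_neg hsid]
              | some w =>
                  have hltw := pvLt_10 hx1 (ha w rfl)
                  simp only [pvPick, pvMinStep, hltw, Bool.false_eq_true, if_false]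

-- ===== VERDICT (by name: the statement is the Claim_ definition above) =====
theorem next_pending_source_spec : Claim_equal_next_pending_source := by
  intro files done _
  unfold Spec_next_pending_source
  show (match PySem.List.sorted2 (files.filter (pvPending done)) pvFlag (fun f => pvGetD f "source_id") false with
        | [] => none
        | f :: _ => pvGet? f "source_id") =
       (match pvPick (files.foldl (pvBStep done) (none, none)) with
        | none => none
        | some f => pvGet? f "source_id")
  rw [foldl_bstep_filter,
      pvMain done _ none none (fun g hg => by cases hg) (fun g hg => by cases hg)
        (fun f hf => List.of_mem_filter hf)]
  have hhead := sorted2_head (files.filter (pvPending done))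
  have hpick : pvPick (none, none) = (none : Option (List (String × String))) := rfl
  rw [hpick]
  cases hs : PySem.List.sorted2 (files.filter (pvPending done)) pvFlag (fun f => pvGetD f "source_id") false with
  | nil =>
      rw [hs] at hhead
      rw [← hhead]
      rfl
  | cons f rest =>
      rw [hs] at hhead
      rw [← hhead]
      rfl
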